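-- pv_equiv track=rewrite | github.com/naguraghu99/prep | PythonDSAlgo/bst.py | solve
-- ===== SOURCE A (Python) =====
-- class BST:
--     RootNode = None
--
--     def Insert(self, rootNode, newNode):
--         newNode.Level = rootNode.Level + 1
--         level = newNode.Level
--         if newNode.Value > rootNode.Value:
--             if rootNode.Right == None:
--                 # print ('Inserting Node with value ',newNode.Value,'at level',newNode.Level)
--                 rootNode.Right = newNode
--
--             else:
--                 level = self.Insert(rootNode.Right, newNode)
--         elif newNode.Value < rootNode.Value or newNode.Value == rootNode.Value:
--             if rootNode.Left == None:
--                 # print ('Inserting Node with value ',newNode.Value,'at level',newNode.Level)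
--                 rootNode.Left = newNode
--             else:
--                 level = self.Insert(rootNode.Left, newNode)
--         return level
--
-- class Node:
--     Left = None
--     Right = None
--     Value = 0
--     Level = 0
--
-- def solve (A,N):
--     # Return a list of N elements, ith element representing level of A[i]
--     # Write your code here
--
--     bst = BST()
--     rootNode = Node()
--     rootNode.Value = A[0]
--     rootNode.Level = 1
--     levels = [1]
--     for element in A[1:]:
--         newNode = Node()
--         newNode.Value = element
--         level = bst.Insert(rootNode, newNode)
--         levels.append(level)
--     #print (levels)
--     return levels
-- ===== SOURCE B (Python) =====
-- def solve(A, N):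
--     # Treeless re-implementation: a node's BST level is 1 + the number of
--     # earlier elements hit by a key-interval narrowing walk (keys (value, -index)
--     # make duplicates go left, matching the BST's tie rule).
--     levels = []
--     seen = []  # keys of already-inserted elements, in insertion order
--     for j, v in enumerate(A):
--         kj = (v, -j)
--         lo = hi = None
--         depth = 1
--         for ki in seen:
--             if (lo is None or lo < ki) and (hi is None or ki < hi):
--                 depth += 1
--                 if ki < kj:
--                     lo = ki
--                 else:
--                     hi = ki
--         levels.append(depth)
--         seen.append(kj)
--     return levels
-- ===== Notes on version B (the rewrite author's own statement) =====
-- stated objective: alternative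
-- what changed: Replaces the mutable BST built by recursive insertion with a treeless purely-functional computation: each element's level is 1 + the number of earlier elements hit by an interval-narrowing scan over keys (value, -index), which encodes the duplicates-go-left rule without any tree structure.
import Mathlib
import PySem

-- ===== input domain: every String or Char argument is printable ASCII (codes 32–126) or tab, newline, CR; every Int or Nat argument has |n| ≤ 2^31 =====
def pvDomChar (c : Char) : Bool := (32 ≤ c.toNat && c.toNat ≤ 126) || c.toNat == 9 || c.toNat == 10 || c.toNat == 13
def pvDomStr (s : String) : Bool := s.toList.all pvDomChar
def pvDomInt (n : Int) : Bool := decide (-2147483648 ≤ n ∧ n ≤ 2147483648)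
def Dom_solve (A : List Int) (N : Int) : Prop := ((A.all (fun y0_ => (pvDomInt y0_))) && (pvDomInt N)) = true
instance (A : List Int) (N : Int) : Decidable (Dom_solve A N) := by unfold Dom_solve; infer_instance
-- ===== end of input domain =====

-- B computes BST insertion levels without a tree (interval-narrowing scan); same values, alternative structure.

-- ===== PORT A =====
-- Tree with value and level fields; nil = Python None child.
inductive BTree where
  | nil : BTree
  | node : Int → Int → BTree → BTree → BTree
deriving DecidableEq, Repr

-- BST.Insert: returns (updated tree, level of inserted node); duplicates go left.
def insertA (v : Int) : BTree → BTree × Int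
  | .nil => (.nil, 0)   -- unreachable: A's Insert is only called on an existing node
  | .node rv rl l r =>
    let newLvl := rl + 1
    if v > rv then
      match r with
      | .nil => (.node rv rl l (.node v newLvl .nil .nil), newLvl)
      | .node a b c d =>
        let p := insertA v (.node a b c d)
        (.node rv rl l p.1, p.2)
    else
      match l with
      | .nil => (.node rv rl (.node v newLvl .nil .nil) r, newLvl)
      | .node a b c d =>
        let p := insertA v (.node a b c d)
        (.node rv rl p.1 r, p.2)

def solve (A : List Int) (N : Int) : List Int :=
  match A with
  | [] => []   -- Python raises IndexError at A[0] here (outside Pre_solve)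
  | a0 :: rest =>
    (rest.foldl (fun (st : BTree × List Int) el =>
      let p := insertA el st.1
      (p.1, st.2 ++ [p.2])) ((BTree.node a0 1 .nil .nil), [1])).2

-- ===== PORT B =====
-- Python tuple '<' on int pairs (lexicographic).
def keyLt (a b : Int × Int) : Bool := decide (a.1 < b.1) || (a.1 == b.1 && decide (a.2 < b.2))

-- '(lo is None or lo < ki) and (hi is None or ki < hi)'
def inB (lo hi : Option (Int × Int)) (k : Int × Int) : Bool :=
  (match lo with | none => true | some l => keyLt l k) &&
  (match hi with | none => true | some h => keyLt k h)

-- body of B's inner loop; state = (lo, hi, depth)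
def altStep (kj : Int × Int) (st : Option (Int × Int) × Option (Int × Int) × Int)
    (ki : Int × Int) : Option (Int × Int) × Option (Int × Int) × Int :=
  if inB st.1 st.2.1 ki then
    if keyLt ki kj then (some ki, st.2.1, st.2.2 + 1) else (st.1, some ki, st.2.2 + 1)
  else st

def solve_alt (A : List Int) (N : Int) : List Int :=
  (A.foldl (fun (st : Int × List (Int × Int) × List Int) v =>
    let kj : Int × Int := (v, -st.1)
    let w := st.2.1.foldl (altStep kj) (none, none, (1 : Int))
    (st.1 + 1, st.2.1 ++ [kj], st.2.2 ++ [w.2.2])) ((0 : Int), ([] : List (Int × Int)), ([] : List Int))).2.2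

-- ===== PRECONDITION & SPEC =====
-- Pre_ excludes only the empty list, on which Python A raises IndexError at A[0].
def Pre_solve (A : List Int) (N : Int) : Prop := A ≠ []
instance (A : List Int) (N : Int) : Decidable (Pre_solve A N) := by unfold Pre_solve; infer_instance
def pvWitness_solve : List Int × Int := ([2, 1, 3, 1], 4)

def Spec_solve (A : List Int) (N : Int) (out : List Int) : Prop := out = solve_alt A N
instance (A : List Int) (N : Int) (out : List Int) : Decidable (Spec_solve A N out) := by unfold Spec_solve; infer_instance

-- ===== CLAIM (what is proved, stated in full; the proofs are below) =====
def Claim_equal_solve : Prop := ∀ (A : List Int) (N : Int), Dom_solve A N → Pre_solve A N → Spec_solve A N (solve A N)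

-- ===== LEMMAS AND PROOFS =====

-- proof-side model: key tree (keys = (value, -index), all distinct)
inductive KTree where
  | nil : KTree
  | node : (Int × Int) → KTree → KTree → KTree
deriving DecidableEq, Repr

def insK (k : Int × Int) : KTree → KTree × Nat
  | .nil => (.node k .nil .nil, 1)
  | .node rk l r =>
    if keyLt rk k then
      let p := insK k r; (.node rk l p.1, p.2 + 1)
    else
      let p := insK k l; (.node rk p.1 r, p.2 + 1)

def buildK (t : KTree) (ks : List (Int × Int)) : KTree := ks.foldl (fun t k => (insK k t).1) t

def keysOf : KTree → List (Int × Int)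
  | .nil => []
  | .node k l r => k :: (keysOf l ++ keysOf r)

def eraseT (c : Int) : KTree → BTree
  | .nil => .nil
  | .node k l r => .node k.1 c (eraseT (c + 1) l) (eraseT (c + 1) r)

theorem keyLt_trans {a b c : Int × Int} (h1 : keyLt a b = true) (h2 : keyLt b c = true) :
    keyLt a c = true := by
  simp only [keyLt, Bool.or_eq_true, Bool.and_eq_true, decide_eq_true_eq, beq_iff_eq] at *
  omega

theorem keyLt_asymm {a b : Int × Int} (h : keyLt a b = true) : keyLt b a = false := by
  simp only [keyLt, Bool.or_eq_true, Bool.and_eq_true, decide_eq_true_eq, beq_iff_eq,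
    Bool.or_eq_false_iff, Bool.and_eq_false_iff, decide_eq_false_iff_not, beq_eq_false_iff_ne] at *
  omega

theorem keyLt_tricho {a b : Int × Int} (hne : a.2 ≠ b.2) (h : keyLt a b = false) :
    keyLt b a = true := by
  simp only [keyLt, Bool.or_eq_true, Bool.and_eq_true, decide_eq_true_eq, beq_iff_eq,
    Bool.or_eq_false_iff, Bool.and_eq_false_iff, decide_eq_false_iff_not, beq_eq_false_iff_ne] at *
  omega

theorem mem_insK {x k : Int × Int} {t : KTree} :
    x ∈ keysOf (insK k t).1 ↔ x = k ∨ x ∈ keysOf t := by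
  induction t with
  | nil => simp [insK, keysOf]
  | node rk l r ihl ihr =>
    by_cases h : keyLt rk k = true
    · simp [insK, h, keysOf, ihr]; tauto
    · simp [insK, h, keysOf, ihl]; tauto

theorem mem_buildK {x : Int × Int} {ks : List (Int × Int)} {t : KTree} :
    x ∈ keysOf (buildK t ks) ↔ x ∈ keysOf t ∨ x ∈ ks := by
  induction ks generalizing t with
  | nil => simp [buildK]
  | cons k ks ih =>
    simp only [buildK, List.foldl_cons] at *
    rw [ih, mem_insK]
    simp; tauto

theorem insK_ne_nil {k : Int × Int} {t : KTree} : (insK k t).1 ≠ .nil := by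
  cases t with
  | nil => simp [insK]
  | node rk l r => by_cases h : keyLt rk k = true <;> simp [insK, h]

theorem buildK_ne_nil {ks : List (Int × Int)} {t : KTree} (h : t ≠ .nil) :
    buildK t ks ≠ .nil := by
  induction ks generalizing t with
  | nil => simpa [buildK]
  | cons k ks ih => exact ih insK_ne_nil

-- decomposition of insertion-built trees
theorem buildK_split (ks : List (Int × Int)) (k0 : Int × Int) (l r : KTree) :
    buildK (.node k0 l r) ks
      = .node k0 (buildK l (ks.filter (fun k => !keyLt k0 k)))
                 (buildK r (ks.filter (fun k => keyLt k0 k))) := by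
  induction ks generalizing l r with
  | nil => simp [buildK]
  | cons k ks ih =>
    by_cases h : keyLt k0 k = true
    · simp only [buildK, List.foldl_cons, List.filter_cons, h]
      simp only [insK, h, if_pos]
      rw [show (List.foldl (fun t k => (insK k t).1) (KTree.node k0 l (insK k r).1) ks) =
            buildK (.node k0 l (insK k r).1) ks from rfl, ih]
      simp [buildK]
    · simp only [buildK, List.foldl_cons, List.filter_cons, h]
      simp only [insK, h, if_neg, Bool.false_eq_true, not_false_iff]
      rw [show (List.foldl (fun t k => (insK k t).1) (KTree.node k0 (insK k l).1 r) ks) =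
            buildK (.node k0 (insK k l).1 r) ks from rfl, ih]
      simp [buildK]

-- A's Insert = key-tree insert, with levels = offset + depth
theorem insertA_gt_nil (v rv rl : Int) (l : BTree) (h : v > rv) :
    insertA v (.node rv rl l .nil) = (.node rv rl l (.node v (rl + 1) .nil .nil), rl + 1) := by
  conv_lhs => unfold insertA
  simp only [if_pos h]

theorem insertA_gt_node (v rv rl a b : Int) (l c d : BTree) (h : v > rv) :
    insertA v (.node rv rl l (.node a b c d))
      = (.node rv rl l (insertA v (.node a b c d)).1, (insertA v (.node a b c d)).2) := by
  conv_lhs => unfold insertA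
  simp only [if_pos h]

theorem insertA_le_nil (v rv rl : Int) (r : BTree) (h : ¬ v > rv) :
    insertA v (.node rv rl .nil r) = (.node rv rl (.node v (rl + 1) .nil .nil) r, rl + 1) := by
  conv_lhs => unfold insertA
  simp only [if_neg h]

theorem insertA_le_node (v rv rl a b : Int) (r c d : BTree) (h : ¬ v > rv) :
    insertA v (.node rv rl (.node a b c d) r)
      = (.node rv rl (insertA v (.node a b c d)).1 r, (insertA v (.node a b c d)).2) := by
  conv_lhs => unfold insertA
  simp only [if_neg h]

theorem insK_true (k rk : Int × Int) (l r : KTree) (h : keyLt rk k = true) :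
    insK k (.node rk l r) = (.node rk l (insK k r).1, (insK k r).2 + 1) := by
  conv_lhs => unfold insK
  simp only [if_pos h]

theorem insK_false (k rk : Int × Int) (l r : KTree) (h : keyLt rk k = false) :
    insK k (.node rk l r) = (.node rk (insK k l).1 r, (insK k l).2 + 1) := by
  conv_lhs => unfold insK
  simp only [h, Bool.false_eq_true, if_false]

theorem insertA_eq_insK (t : KTree) (c : Int) (v idx : Int)
    (hne : t ≠ .nil) (hkeys : ∀ k' ∈ keysOf t, idx < k'.2) :
    insertA v (eraseT c t)
      = (eraseT c (insK (v, idx) t).1, c - 1 + ((insK (v, idx) t).2 : Int)) := by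
  induction t generalizing c with
  | nil => exact absurd rfl hne
  | node rk l r ihl ihr =>
    have hroot : idx < rk.2 := hkeys rk (by simp [keysOf])
    have hcmp : keyLt rk (v, idx) = decide (rk.1 < v) := by
      simp only [keyLt]
      by_cases h : rk.1 < v
      · simp [h]
      · simp [h]; omega
    by_cases hgt : v > rk.1
    · -- right
      have hk : keyLt rk (v, idx) = true := by rw [hcmp]; simpa
      rw [insK_true _ _ _ _ hk]
      cases r with
      | nil =>
        simp only [eraseT]
        rw [insertA_gt_nil _ _ _ _ hgt]
        simp [insK, eraseT]
        omega
      | node a b cc =>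
        have hrec := ihr (c + 1) (by simp)
          (fun k' hk' => hkeys k' (by simp [keysOf] at hk' ⊢; tauto))
        simp only [eraseT]
        rw [insertA_gt_node _ _ _ _ _ _ _ _ hgt]
        simp only [eraseT] at hrec
        rw [hrec]
        simp only [Prod.mk.injEq, true_and]
        push_cast; ring
    · -- left
      have hk : keyLt rk (v, idx) = false := by
        rw [hcmp]; simp only [decide_eq_false_iff_not]; omega
      rw [insK_false _ _ _ _ hk]
      cases l with
      | nil =>
        simp only [eraseT]
        rw [insertA_le_nil _ _ _ _ hgt]
        simp [insK, eraseT]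
        omega
      | node a b cc =>
        have hrec := ihl (c + 1) (by simp)
          (fun k' hk' => hkeys k' (by simp [keysOf] at hk' ⊢; tauto))
        simp only [eraseT]
        rw [insertA_le_node _ _ _ _ _ _ _ _ hgt]
        simp only [eraseT] at hrec
        rw [hrec]
        simp only [Prod.mk.injEq, true_and]
        push_cast; ring

-- B's interval walk = depth of key-tree insert into the filtered prefix tree
theorem walk_eq_insK (kj : Int × Int) (ks : List (Int × Int)) (lo hi : Option (Int × Int))
    (d : Int) (hp : List.Pairwise (fun a b => a.2 ≠ b.2) ks) :
    (ks.foldl (altStep kj) (lo, hi, d)).2.2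
      = d - 1 + ((insK kj (buildK .nil (ks.filter (inB lo hi)))).2 : Int) := by
  induction ks generalizing lo hi d with
  | nil => simp [buildK, insK]
  | cons k0 ks ih =>
    rcases List.pairwise_cons.mp hp with ⟨hh, hp'⟩
    by_cases hb : inB lo hi k0 = true
    · have hlo : ∀ x, lo = some x → keyLt x k0 = true := by
        intro x hx; simp [inB, hx] at hb; exact hb.1
      have hhi : ∀ x, hi = some x → keyLt k0 x = true := by
        intro x hx; simp [inB, hx] at hb; exact hb.2
      by_cases hc : keyLt k0 kj = true
      · -- k0 goes below kj: lo := k0, tree insert goes right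
        have hstep : altStep kj (lo, hi, d) k0 = (some k0, hi, d + 1) := by
          simp [altStep, hb, hc]
        rw [List.foldl_cons, hstep, ih _ _ _ hp']
        have hfilt : ks.filter (inB (some k0) hi)
            = (ks.filter (inB lo hi)).filter (fun k => keyLt k0 k) := by
          rw [List.filter_filter]
          apply List.filter_congr
          intro x hx
          by_cases hkx : keyLt k0 x = true
          · cases lo with
            | none => simp [inB, hkx]
            | some l => simp [inB, hkx, keyLt_trans (hlo l rfl) hkx]
          · have hkx' : keyLt k0 x = false := by simpa using hkx
            simp [inB, hkx']
        rw [List.filter_cons_of_pos hb]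
        rw [show buildK KTree.nil (k0 :: List.filter (inB lo hi) ks)
            = buildK (.node k0 .nil .nil) (List.filter (inB lo hi) ks) from rfl]
        rw [buildK_split]
        simp only [insK, hc, if_pos]
        rw [← hfilt]
        push_cast; ring
      · -- k0 goes above kj: hi := k0, tree insert goes left
        have hstep : altStep kj (lo, hi, d) k0 = (lo, some k0, d + 1) := by
          simp [altStep, hb, hc]
        rw [List.foldl_cons, hstep, ih _ _ _ hp']
        have hfilt : ks.filter (inB lo (some k0))
            = (ks.filter (inB lo hi)).filter (fun k => !keyLt k0 k) := by
          rw [List.filter_filter]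
          apply List.filter_congr
          intro x hx
          have hne2 : k0.2 ≠ x.2 := hh x hx
          by_cases hxk : keyLt x k0 = true
          · have h1 : keyLt k0 x = false := keyLt_asymm hxk
            cases hi with
            | none => simp [inB, hxk, h1]
            | some h' => simp [inB, hxk, h1, keyLt_trans hxk (hhi h' rfl)]
          · have hxk' : keyLt x k0 = false := by simpa using hxk
            have h1 : keyLt k0 x = true := keyLt_tricho (Ne.symm hne2) hxk'
            simp [inB, hxk', h1]
        rw [List.filter_cons_of_pos hb]
        rw [show buildK KTree.nil (k0 :: List.filter (inB lo hi) ks)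
            = buildK (.node k0 .nil .nil) (List.filter (inB lo hi) ks) from rfl]
        rw [buildK_split]
        simp only [insK, hc, Bool.false_eq_true, if_neg, not_false_iff]
        rw [← hfilt]
        push_cast; ring
    · have hstep : altStep kj (lo, hi, d) k0 = (lo, hi, d) := by
        simp [altStep, hb]
      rw [List.foldl_cons, hstep, ih _ _ _ hp', List.filter_cons_of_neg (by simpa using hb)]

-- lockstep induction over the remaining elements
theorem main_lockstep (rest : List Int) (j : Int) (seen : List (Int × Int))
    (levels : List Int)
    (hne : seen ≠ [])
    (hp : List.Pairwise (fun a b => a.2 ≠ b.2) seen)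
    (hgt : ∀ k ∈ seen, -j < k.2) :
    (rest.foldl (fun (st : BTree × List Int) el =>
        let p := insertA el st.1
        (p.1, st.2 ++ [p.2])) ((eraseT 1 (buildK .nil seen)), levels)).2
      = (rest.foldl (fun (st : Int × List (Int × Int) × List Int) v =>
          let kj : Int × Int := (v, -st.1)
          let w := st.2.1.foldl (altStep kj) (none, none, (1 : Int))
          (st.1 + 1, st.2.1 ++ [kj], st.2.2 ++ [w.2.2])) (j, seen, levels)).2.2 := by
  induction rest generalizing j seen levels with
  | nil => rfl
  | cons v rest ih =>
    have htne : buildK .nil seen ≠ .nil := by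
      cases seen with
      | nil => exact absurd rfl hne
      | cons s ss =>
        have hb' : buildK KTree.nil (s :: ss) = buildK (insK s .nil).1 ss := rfl
        rw [hb']; exact buildK_ne_nil insK_ne_nil
    have hins := insertA_eq_insK (buildK .nil seen) 1 v (-j) htne
      (fun k' hk' => hgt k' (by rcases mem_buildK.mp hk' with h | h
                                · simp [keysOf] at h
                                · exact h))
    have hwalk := walk_eq_insK (v, -j) seen none none 1 hp
    have hfilt : seen.filter (inB none none) = seen := by
      apply List.filter_eq_self.mpr; intro a _; simp [inB]
    rw [hfilt] at hwalk
    simp only [List.foldl_cons]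
    rw [hins]
    have hbuild : (insK (v, -j) (buildK .nil seen)).1 = buildK .nil (seen ++ [(v, -j)]) := by
      simp [buildK, List.foldl_append]
    rw [hbuild]
    rw [ih (j + 1) (seen ++ [(v, -j)]) (levels ++ [1 - 1 + ((insK (v, -j) (buildK .nil seen)).2 : Int)])
      (by simp)
      (by rw [List.pairwise_append]
          refine ⟨hp, by simp, ?_⟩
          intro a ha b hb
          simp at hb
          rw [hb]
          have := hgt a ha; omega)
      (by intro k hk
          rcases List.mem_append.mp hk with h | h
          · have := hgt k h; omega
          · simp at h; rw [h]; omega)]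
    rw [hwalk]

-- ===== VERDICT (by name: the statement is the Claim_ definition above) =====
theorem solve_spec : Claim_equal_solve := by
  intro A N _hdom hpre
  unfold Spec_solve
  cases A with
  | nil => exact absurd rfl hpre
  | cons a0 rest =>
    show solve (a0 :: rest) N = solve_alt (a0 :: rest) N
    unfold solve solve_alt
    simp only [List.foldl_cons, List.foldl_nil]
    have h0 : (BTree.node a0 1 .nil .nil) = eraseT 1 (buildK .nil [(a0, -(0 : Int))]) := by
      simp [buildK, insK, eraseT]
    rw [h0]
    have := main_lockstep rest 1 [(a0, -(0 : Int))] [1]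
      (by simp) (by simp) (by intro k hk; simp at hk; rw [hk]; norm_num)
    convert this using 2
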